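-- pv_equiv track=rewrite | github.com/NotwenCaasi/lander_AI_project | utils/live_plot.py | reset_curve
-- ===== SOURCE A (Python) =====
-- def reset_curve(epoch_data):
--     """Helper function to reset curve index based on restart of epochs."""
--     curves = []
--     curve = []
--     last_epoch = epoch_data[0][0]  # Initialize the first epoch (extract the epoch value)
--
--     for epoch, reward in epoch_data:
--         if epoch < last_epoch:  # Compare only the epoch value
--             curves.append(curve)
--             curve = []
--         curve.append(reward)
--         last_epoch = epoch
--     curves.append(curve)  # Append the last curve
--     return curves
-- ===== SOURCE B (Python) =====
-- def reset_curve(epoch_data):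
--     """Helper function to reset curve index based on restart of epochs."""
--     # Build the curves back-to-front: walk the data from the right, deciding a
--     # split by looking at the epoch of the element to the current one's right.
--     e_next, r_last = epoch_data[-1]  # IndexError on empty input, like the original
--     curves = [[r_last]]
--     for e, r in reversed(epoch_data[:-1]):
--         if e_next < e:          # the element to the right restarted the epochs
--             curves.insert(0, [r])
--         else:
--             curves[0] = [r] + curves[0]
--         e_next = e
--     return curves
-- ===== Notes on version B (the rewrite author's own statement) =====
-- stated objective: alternative
-- what changed: Replaces the forward append-and-reset loop carrying (curves, current curve, last_epoch) by a backward pass that builds the output back-to-front, deciding each split by lookahead at the right neighbour's epoch and prepending rewards to the head curve.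
import Mathlib
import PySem

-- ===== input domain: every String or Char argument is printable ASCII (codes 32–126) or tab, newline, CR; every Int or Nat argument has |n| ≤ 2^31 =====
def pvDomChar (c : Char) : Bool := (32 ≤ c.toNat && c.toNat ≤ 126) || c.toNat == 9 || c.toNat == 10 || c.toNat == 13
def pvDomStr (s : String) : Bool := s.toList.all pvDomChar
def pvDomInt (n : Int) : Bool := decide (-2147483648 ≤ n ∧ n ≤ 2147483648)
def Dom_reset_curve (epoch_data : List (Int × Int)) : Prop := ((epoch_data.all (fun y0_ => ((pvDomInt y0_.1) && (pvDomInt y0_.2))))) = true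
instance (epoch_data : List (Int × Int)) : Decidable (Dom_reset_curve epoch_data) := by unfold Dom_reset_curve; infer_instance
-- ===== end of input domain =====

-- B builds the curves back-to-front with epoch lookahead instead of a forward append-and-reset loop; objective: alternative decomposition.


-- ===== PORT A =====
-- loop body of A: state = (curves, curve, last_epoch)
def stepA (st : List (List Int) × List Int × Int) (p : Int × Int) :
    List (List Int) × List Int × Int :=
  match st, p with
  | (curves, curve, last), (epoch, reward) =>
    if epoch < last then (curves ++ [curve], [reward], epoch)
    else (curves, curve ++ [reward], epoch)

def reset_curve (epoch_data : List (Int × Int)) : List (List Int) :=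
  match epoch_data with
  | [] => []  -- Python raises IndexError at epoch_data[0][0]; excluded by Pre_
  | (e0, _) :: _ =>
    let st := epoch_data.foldl stepA ([], [], e0)
    st.1 ++ [st.2.1]

-- ===== PORT B =====
-- loop body of B: state = (curves, e_next)
def stepB (st : List (List Int) × Int) (p : Int × Int) : List (List Int) × Int :=
  match st, p with
  | (curves, eNext), (e, r) =>
    if eNext < e then ([r] :: curves, e)
    else
      match curves with
      | [] => ([[r]], e)  -- unreachable: curves is never empty
      | c :: cs => (([r] ++ c) :: cs, e)

def reset_curve_alt (epoch_data : List (Int × Int)) : List (List Int) :=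
  match epoch_data.getLast? with  -- epoch_data[-1]; IndexError on empty, excluded by Pre_
  | none => []
  | some (eL, rL) =>
    ((PySem.List.slice epoch_data none (some (-1))).reverse.foldl stepB ([[rL]], eL)).1

-- ===== PRECONDITION & SPEC =====
-- Pre_ excludes exactly the empty list, on which both Pythons raise IndexError.
def Pre_reset_curve (epoch_data : List (Int × Int)) : Prop := epoch_data ≠ []
instance (epoch_data : List (Int × Int)) : Decidable (Pre_reset_curve epoch_data) := by
  unfold Pre_reset_curve; infer_instance
def pvWitness_reset_curve : (List (Int × Int)) := [(1, 5), (2, 6), (1, 7)]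

def Spec_reset_curve (epoch_data : List (Int × Int)) (out : List (List Int)) : Prop := out = reset_curve_alt epoch_data
instance (epoch_data : List (Int × Int)) (out : List (List Int)) : Decidable (Spec_reset_curve epoch_data out) := by unfold Spec_reset_curve; infer_instance

-- ===== CLAIM (what is proved, stated in full; the proofs are below) =====
def Claim_equal_reset_curve : Prop := ∀ (epoch_data : List (Int × Int)), Dom_reset_curve epoch_data → Pre_reset_curve epoch_data → Spec_reset_curve epoch_data (reset_curve epoch_data)

-- ===== LEMMAS AND PROOFS =====

-- common characterisation: grp l = (curves of l, first epoch of l) for nonempty l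
def grp : List (Int × Int) → List (List Int) × Int
  | [] => ([], 0)
  | [(e, r)] => ([[r]], e)
  | (e, r) :: q :: t =>
    let gr := grp (q :: t)
    if gr.2 < e then ([r] :: gr.1, e)
    else
      match gr.1 with
      | [] => ([[r]], e)
      | c :: cs => (([r] ++ c) :: cs, e)

theorem grp_snd (e r : Int) (t : List (Int × Int)) : (grp ((e, r) :: t)).2 = e := by
  cases t with
  | nil => rfl
  | cons q t' =>
    simp only [grp]
    split
    · rfl
    · split <;> rfl

theorem grp_fst_ne_nil (l : List (Int × Int)) (h : l ≠ []) : (grp l).1 ≠ [] := by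
  match l with
  | [(e, r)] => simp [grp]
  | (e, r) :: q :: t =>
    simp only [grp]
    split
    · simp
    · split <;> simp

-- B's backward fold computes grp
theorem foldr_stepB_grp (xs : List (Int × Int)) (eL rL : Int) :
    xs.foldr (fun p st => stepB st p) ([[rL]], eL) = grp (xs ++ [(eL, rL)]) := by
  induction xs with
  | nil => rfl
  | cons p xs ih =>
    obtain ⟨e, r⟩ := p
    rw [List.foldr_cons, ih]
    cases hxs : xs ++ [(eL, rL)] with
    | nil => simp at hxs
    | cons q t => simp only [List.cons_append, hxs, grp, stepB]

theorem alt_eq_grp (l : List (Int × Int)) (h : l ≠ []) :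
    reset_curve_alt l = (grp l).1 := by
  rcases List.eq_nil_or_concat l with rfl | ⟨xs, ⟨eL, rL⟩, rfl⟩
  · exact absurd rfl h
  unfold reset_curve_alt
  simp only [List.concat_eq_append]
  rw [List.getLast?_concat]
  simp only [PySem.List.slice_to_neg_one, List.dropLast_concat, List.foldl_reverse,
    foldr_stepB_grp]

-- A's forward fold, characterised by hfun
def hfun : Int → List Int → List (Int × Int) → List (List Int)
  | _, c, [] => [c]
  | last, c, (e, r) :: t => if e < last then c :: hfun e [r] t else hfun e (c ++ [r]) t

theorem foldl_stepA_hfun (l : List (Int × Int)) (C : List (List Int)) (c : List Int)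
    (last : Int) :
    (l.foldl stepA (C, c, last)).1 ++ [(l.foldl stepA (C, c, last)).2.1]
      = C ++ hfun last c l := by
  induction l generalizing C c last with
  | nil => rfl
  | cons p t ih =>
    obtain ⟨e, r⟩ := p
    simp only [List.foldl_cons, stepA, hfun]
    by_cases he : e < last
    · simp only [he, if_true, ih]
      simp
    · simp only [he, if_false, ih]

theorem hfun_grp (l : List (Int × Int)) (last : Int) (c : List Int) (h : l ≠ []) :
    hfun last c l = if (grp l).2 < last then c :: (grp l).1
                    else (c ++ (grp l).1.headI) :: (grp l).1.tail := by
  induction l generalizing last c with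
  | nil => exact absurd rfl h
  | cons p t ih =>
    obtain ⟨e, r⟩ := p
    cases t with
    | nil =>
      simp only [hfun, grp]
      by_cases he : e < last <;> simp [he]
    | cons q t' =>
      have ht : q :: t' ≠ [] := by simp
      obtain ⟨c1, cs, hc⟩ : ∃ c1 cs, (grp (q :: t')).1 = c1 :: cs := by
        cases hg : (grp (q :: t')).1 with
        | nil => exact absurd hg (grp_fst_ne_nil _ ht)
        | cons a b => exact ⟨a, b, rfl⟩
      have h1 := ih e [r] ht
      have h2 := ih e (c ++ [r]) ht
      rw [hc] at h1 h2
      show (if e < last then c :: hfun e [r] (q :: t') else hfun e (c ++ [r]) (q :: t')) = _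
      rw [h1, h2]
      simp only [grp, hc]
      by_cases hne : (grp (q :: t')).2 < e <;> by_cases he : e < last <;>
        simp [he, hne, List.append_assoc]

theorem a_eq_grp (l : List (Int × Int)) (h : l ≠ []) :
    reset_curve l = (grp l).1 := by
  cases l with
  | nil => exact absurd rfl h
  | cons p t =>
    obtain ⟨e0, r0⟩ := p
    show ((((e0, r0) :: t).foldl stepA ([], [], e0)).1
        ++ [(((e0, r0) :: t).foldl stepA ([], [], e0)).2.1]) = _
    rw [foldl_stepA_hfun]
    rw [hfun_grp _ _ _ (by simp), grp_snd]
    simp only [lt_self_iff_false, if_false, List.nil_append]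
    obtain ⟨c1, cs, hc⟩ : ∃ c1 cs, (grp ((e0, r0) :: t)).1 = c1 :: cs := by
      cases hg : (grp ((e0, r0) :: t)).1 with
      | nil => exact absurd hg (grp_fst_ne_nil _ (by simp))
      | cons a b => exact ⟨a, b, rfl⟩
    simp [hc]

-- ===== VERDICT (by name: the statement is the Claim_ definition above) =====
theorem reset_curve_spec : Claim_equal_reset_curve := by
  intro ed _ hpre
  unfold Spec_reset_curve
  rw [a_eq_grp ed hpre, alt_eq_grp ed hpre]
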